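-- pv_equiv track=rewrite | github.com/nielstron/evaluate | src/evaluate/evaluator/token_classification.py | words_to_offsets
-- ===== SOURCE A (Python) =====
-- from typing import Any, Callable, Dict, List, Optional, Tuple, Union
--
-- def words_to_offsets(words: List[str], join_by: str):
--     """
--     Convert a list of words to a list of offsets, where word are joined by `join_by`.
--
--     Args:
--         words (List[str]): List of words to get offsets from.
--         join_by (str): String to insert between words.
--
--     Returns:
--         List[Tuple[int, int]]: List of the characters (start index, end index) for each of the words.
--     """
--     offsets = []
--
--     start = 0
--     for word in words:
--         end = start + len(word) - 1
--         offsets.append((start, end))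
--         start = end + len(join_by) + 1
--
--     return offsets
-- ===== SOURCE B (Python) =====
-- def words_to_offsets(words, join_by):
--     j = len(join_by)
--     # position just past the end of the joined text, counting one trailing separator
--     pos = sum(map(len, words)) + j * len(words)
--     out = []
--     for w in reversed(words):
--         pos -= j
--         start = pos - len(w)
--         out.append((start, pos - 1))
--         pos = start
--     out.reverse()
--     return out
-- ===== Notes on version B (the rewrite author's own statement) =====
-- stated objective: alternative
-- what changed: B builds the result back-to-front: it precomputes the total joined length, walks the words in reverse subtracting each word's and separator's length from an end pointer, and reverses the collected list, instead of A's forward loop carrying a running start.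
import Mathlib
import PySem

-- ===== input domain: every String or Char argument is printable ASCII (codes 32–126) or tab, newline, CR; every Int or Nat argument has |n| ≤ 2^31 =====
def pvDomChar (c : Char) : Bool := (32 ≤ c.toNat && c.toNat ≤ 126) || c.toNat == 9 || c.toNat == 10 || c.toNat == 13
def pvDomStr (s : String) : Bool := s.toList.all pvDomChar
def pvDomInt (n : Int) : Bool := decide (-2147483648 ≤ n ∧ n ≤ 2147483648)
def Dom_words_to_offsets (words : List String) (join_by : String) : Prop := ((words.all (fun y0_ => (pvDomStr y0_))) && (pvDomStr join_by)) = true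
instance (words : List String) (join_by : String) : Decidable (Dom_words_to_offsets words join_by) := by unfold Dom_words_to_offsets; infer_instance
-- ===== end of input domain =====

-- ===== PORT A =====
-- A: one forward loop carrying a running start and appending (start, end) pairs.
def words_to_offsets (words : List String) (join_by : String) : List (Int × Int) :=
  (words.foldl (fun (st : List (Int × Int) × Int) word =>
      let e : Int := st.2 + PySem.Str.len word - 1
      (st.1 ++ [(st.2, e)], e + PySem.Str.len join_by + 1)) ([], 0)).1

-- ===== PORT B =====
-- B: back-to-front build — precompute the total joined length, walk the words in
-- reverse subtracting lengths from an end pointer, then reverse the collected list.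
def words_to_offsets_alt (words : List String) (join_by : String) : List (Int × Int) :=
  let j : Int := PySem.Str.len join_by
  let pos0 : Int := (words.map PySem.Str.len).sum + j * words.length
  let st := words.reverse.foldl (fun (st : List (Int × Int) × Int) w =>
      let pos := st.2 - j
      let start := pos - PySem.Str.len w
      (st.1 ++ [(start, pos - 1)], start)) ([], pos0)
  st.1.reverse

-- ===== PRECONDITION & SPEC =====
def Spec_words_to_offsets (words : List String) (join_by : String) (out : List (Int × Int)) : Prop := out = words_to_offsets_alt words join_by
instance (words : List String) (join_by : String) (out : List (Int × Int)) : Decidable (Spec_words_to_offsets words join_by out) := by unfold Spec_words_to_offsets; infer_instance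

-- ===== CLAIM (what is proved, stated in full; the proofs are below) =====
def Claim_equal_words_to_offsets : Prop := ∀ (words : List String) (join_by : String), Dom_words_to_offsets words join_by → Spec_words_to_offsets words join_by (words_to_offsets words join_by)

-- ===== LEMMAS AND PROOFS =====
-- Reference recursive model both ports are shown equal to.
def pvModel (j : Int) : Int → List String → List (Int × Int)
  | _, [] => []
  | s, w :: ws => (s, s + PySem.Str.len w - 1) :: pvModel j (s + PySem.Str.len w + j) ws

-- total joined length of ws counting one separator per word
def pvT (j : Int) (ws : List String) : Int := (ws.map PySem.Str.len).sum + j * ws.length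

theorem pvA_model (jb : String) (words : List String) :
    ∀ (acc : List (Int × Int)) (s : Int),
    (words.foldl (fun (st : List (Int × Int) × Int) word =>
      let e : Int := st.2 + PySem.Str.len word - 1
      (st.1 ++ [(st.2, e)], e + PySem.Str.len jb + 1)) (acc, s)).1
      = acc ++ pvModel (PySem.Str.len jb) s words := by
  induction words with
  | nil => intro acc s; simp [pvModel]
  | cons w ws ih =>
    intro acc s
    simp only [List.foldl_cons, pvModel]
    rw [ih]
    simp
    ring_nf

theorem pvT_cons (j : Int) (w : String) (ws : List String) :
    pvT j (w :: ws) = pvT j ws + PySem.Str.len w + j := by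
  simp [pvT]; ring

theorem pvB_loop (j : Int) (words : List String) :
    ∀ (acc : List (Int × Int)) (p : Int),
    (words.reverse.foldl (fun (st : List (Int × Int) × Int) w =>
        let pos := st.2 - j
        let start := pos - PySem.Str.len w
        (st.1 ++ [(start, pos - 1)], start)) (acc, p))
      = (acc ++ (pvModel j (p - pvT j words) words).reverse, p - pvT j words) := by
  induction words with
  | nil => intro acc p; simp [pvT, pvModel]
  | cons w ws ih =>
    intro acc p
    rw [List.reverse_cons, List.foldl_append, ih]
    simp only [List.foldl_cons, List.foldl_nil, pvModel, pvT_cons, List.reverse_cons]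
    have h1 : p - (pvT j ws + PySem.Str.len w + j) + PySem.Str.len w + j = p - pvT j ws := by ring
    rw [h1, List.append_assoc]
    have h2 : p - pvT j ws - j - 1 = p - (pvT j ws + PySem.Str.len w + j) + PySem.Str.len w - 1 := by ring
    have h3 : p - pvT j ws - j - PySem.Str.len w = p - (pvT j ws + PySem.Str.len w + j) := by ring
    rw [h2, h3]

-- ===== VERDICT (by name: the statement is the Claim_ definition above) =====
theorem words_to_offsets_spec : Claim_equal_words_to_offsets := by
  intro words join_by _
  unfold Spec_words_to_offsets words_to_offsets words_to_offsets_alt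
  rw [pvA_model join_by words [] 0]
  simp only [pvB_loop, List.nil_append, List.reverse_reverse]
  congr 1
  simp [pvT, PySem.Str.len]
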